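-- pv_equiv track=rewrite | github.com/SerpenHead/CESD-graduation-project | src/evaluation/mme.py | parse_mme_answer
-- ===== SOURCE A (Python) =====
-- def parse_mme_answer(text: str) -> str:
--     """Extract answer from model output for MME (often single letter or short)."""
--     text = text.strip().upper()
--     if not text:
--         return ""
--     for c in text[:50]:
--         if c in "ABCD":
--             return c
--     return text[:1] if text else ""
-- ===== SOURCE B (Python) =====
-- def parse_mme_answer(text: str) -> str:
--     """Extract answer from model output for MME (often single letter or short)."""
--     text = text.strip().upper()
--     if not text:
--         return ""
--     window = text[:50]
--     best = None
--     for c in "ABCD":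
--         pos = window.find(c)
--         if pos >= 0 and (best is None or pos < best[0]):
--             best = (pos, c)
--     return best[1] if best is not None else text[0]
-- ===== Notes on version B (the rewrite author's own statement) =====
-- stated objective: alternative
-- what changed: Instead of scanning the first 50 characters left-to-right for the first multiple-choice letter, B loops over the four target letters A-D, computes each letter's earliest position in the window with str.find, and keeps the letter with the minimum position (fallback to the first character unchanged).
import Mathlib
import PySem

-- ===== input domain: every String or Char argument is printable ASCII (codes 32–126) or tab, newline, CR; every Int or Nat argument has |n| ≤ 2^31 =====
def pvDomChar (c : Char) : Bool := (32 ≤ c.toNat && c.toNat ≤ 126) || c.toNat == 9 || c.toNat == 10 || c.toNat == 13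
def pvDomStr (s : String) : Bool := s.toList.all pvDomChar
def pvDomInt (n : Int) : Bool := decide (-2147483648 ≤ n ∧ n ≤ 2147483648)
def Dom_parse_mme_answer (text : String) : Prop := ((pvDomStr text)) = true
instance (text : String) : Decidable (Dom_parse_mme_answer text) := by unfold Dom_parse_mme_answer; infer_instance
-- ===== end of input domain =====

-- B replaces A's left-to-right scan for the first answer letter by a per-letter minimum-find over the same window: same result, alternative decomposition (no speed claim).

-- ===== PORT A =====
-- A's loop over the first 50 characters, early return of the first answer letter as an Option
def pvScanA : List Char → Option Char
  | [] => none
  | c :: rest => if ['A','B','C','D'].contains c then some c else pvScanA rest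

def parse_mme_answer (text : String) : String :=
  let t := PySem.Str.upper (PySem.Str.strip text)
  if t = "" then ""
  else
    match pvScanA (PySem.List.slice t.toList none (some 50)) with
    | some c => String.ofList [c]
    | none => PySem.Str.slice t none (some 1)

-- ===== PORT B =====
-- one iteration of Source B's loop body: pos = window.find(c); keep (pos, c) if it improves on best
def pvStep (w : List Char) (best : Option (Int × Char)) (c : Char) : Option (Int × Char) :=
  if 0 ≤ PySem.Chars.find w [c] ∧ (∀ b ∈ best, PySem.Chars.find w [c] < b.1) then
    some (PySem.Chars.find w [c], c)
  else best

def parse_mme_answer_alt (text : String) : String :=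
  let t := PySem.Str.upper (PySem.Str.strip text)
  if t = "" then ""
  else
    let w := PySem.List.slice t.toList none (some 50)
    match ['A','B','C','D'].foldl (pvStep w) none with
    | some b => String.ofList [b.2]
    | none =>
      match t.toList with                -- text[0], guarded by the nonempty check above
      | c :: _ => String.ofList [c]
      | [] => ""

-- ===== PRECONDITION & SPEC =====
def Spec_parse_mme_answer (text : String) (out : String) : Prop := out = parse_mme_answer_alt text
instance (text : String) (out : String) : Decidable (Spec_parse_mme_answer text out) := by unfold Spec_parse_mme_answer; infer_instance

-- ===== CLAIM (what is proved, stated in full; the proofs are below) =====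
def Claim_equal_parse_mme_answer : Prop := ∀ (text : String), Dom_parse_mme_answer text → Spec_parse_mme_answer text (parse_mme_answer text)

-- ===== LEMMAS AND PROOFS =====

lemma go_succ (c : Char) (xs : List Char) (k : Nat) :
    PySem.Chars.find.go [c] xs (k+1) =
      if PySem.Chars.find.go [c] xs k = -1 then -1 else PySem.Chars.find.go [c] xs k + 1 := by
  induction xs generalizing k with
  | nil => simp [PySem.Chars.find.go]
  | cons h t ih =>
    simp only [PySem.Chars.find.go]
    by_cases hp : [c].isPrefixOf (h :: t) = true
    · simp [hp]
    · simp only [hp, Bool.false_eq_true, if_false]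
      rw [ih]

lemma find_single_cons (x c : Char) (xs : List Char) :
    PySem.Chars.find (x::xs) [c] =
      if x = c then 0
      else if PySem.Chars.find xs [c] = -1 then -1 else PySem.Chars.find xs [c] + 1 := by
  simp only [PySem.Chars.find, PySem.Chars.find.go]
  by_cases hx : x = c
  · simp [hx, List.isPrefixOf]
  · have hp : [c].isPrefixOf (x :: xs) = false := by
      simp only [List.isPrefixOf, Bool.and_eq_false_iff]
      left; simp [Ne.symm hx]
    rw [if_neg hx]
    simp only [hp, Bool.false_eq_true, if_false]
    exact go_succ c xs 0

def pvShift (b : Option (Int × Char)) : Option (Int × Char) :=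
  b.map (fun p => (p.1 + 1, p.2))

lemma pvStep_good (w : List Char) (b : Option (Int × Char)) (c : Char)
    (hb : ∀ p ∈ b, 0 ≤ p.1) : ∀ p ∈ pvStep w b c, 0 ≤ p.1 := by
  intro p hp
  unfold pvStep at hp
  split at hp
  · rename_i h
    simp only [Option.mem_def, Option.some_inj] at hp
    subst hp; exact h.1
  · exact hb p hp

lemma pvStep_shift (x : Char) (xs : List Char) (c : Char) (hx : x ≠ c)
    (b : Option (Int × Char)) (hb : ∀ p ∈ b, 0 ≤ p.1) :
    pvStep (x::xs) (pvShift b) c = pvShift (pvStep xs b c) := by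
  have hf := PySem.Chars.neg_one_le_find xs [c]
  rcases b with _ | ⟨p, ch⟩
  · have key : PySem.Chars.find (x::xs) [c]
        = if PySem.Chars.find xs [c] = -1 then -1 else PySem.Chars.find xs [c] + 1 := by
      rw [find_single_cons, if_neg hx]
    simp only [pvStep, pvShift, Option.map_none]
    rw [key]
    split_ifs <;> simp_all <;> omega
  · have hp0 : (0:Int) ≤ p := hb (p, ch) rfl
    have key : PySem.Chars.find (x::xs) [c]
        = if PySem.Chars.find xs [c] = -1 then -1 else PySem.Chars.find xs [c] + 1 := by
      rw [find_single_cons, if_neg hx]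
    simp only [pvStep, pvShift, Option.map_some, Option.mem_def, Option.some_inj]
    rw [key]
    split_ifs <;> simp_all <;> omega

lemma foldl_shift (x : Char) (xs : List Char) :
    ∀ (cs : List Char) (b : Option (Int × Char)),
      (∀ c ∈ cs, x ≠ c) → (∀ p ∈ b, 0 ≤ p.1) →
      cs.foldl (pvStep (x::xs)) (pvShift b) = pvShift (cs.foldl (pvStep xs) b) := by
  intro cs
  induction cs with
  | nil => intro b _ _; rfl
  | cons c cs ih =>
    intro b hcs hb
    simp only [List.foldl]
    rw [pvStep_shift x xs c (hcs c (by simp)) b hb]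
    exact ih _ (fun d hd => hcs d (by simp [hd])) (pvStep_good xs b c hb)


def pvPos (b : Option (Int × Char)) : Prop := ∀ p ∈ b, 0 < p.1

lemma step_keep_zero (w : List Char) (c ch : Char) :
    pvStep w (some (0, ch)) c = some (0, ch) := by
  unfold pvStep
  split_ifs with h
  · rcases h with ⟨h1, h2⟩
    have := h2 (0, ch) rfl
    omega
  · rfl

lemma fold_keep_zero (w : List Char) (ch : Char) :
    ∀ cs : List Char, cs.foldl (pvStep w) (some (0, ch)) = some (0, ch) := by
  intro cs
  induction cs with
  | nil => rfl
  | cons c cs ih => simp only [List.foldl, step_keep_zero, ih]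

lemma step_take_zero (w : List Char) (c : Char) (b : Option (Int × Char))
    (h : PySem.Chars.find w [c] = 0) (hb : pvPos b) : pvStep w b c = some (0, c) := by
  unfold pvStep
  rw [if_pos ⟨by omega, fun p hp => by have := hb p hp; omega⟩, h]

lemma step_pos (w : List Char) (c : Char) (b : Option (Int × Char))
    (hc : PySem.Chars.find w [c] ≠ 0) (hb : pvPos b) : pvPos (pvStep w b c) := by
  unfold pvStep
  split_ifs with h
  · intro p hp
    simp only [Option.mem_def, Option.some_inj] at hp
    subst hp
    have := h.1
    simpa using by omega
  · exact hb

lemma fold_zero (w : List Char) (x : Char) :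
    ∀ (cs : List Char) (b : Option (Int × Char)), pvPos b → x ∈ cs →
      PySem.Chars.find w [x] = 0 → (∀ c ∈ cs, c ≠ x → PySem.Chars.find w [c] ≠ 0) →
      cs.foldl (pvStep w) b = some (0, x) := by
  intro cs
  induction cs with
  | nil => intro b _ hmem; cases hmem
  | cons c cs ih =>
    intro b hb hmem h0 hne
    by_cases hcx : c = x
    · subst hcx
      simp only [List.foldl, step_take_zero w c b h0 hb]
      exact fold_keep_zero w c cs
    · have hmem' : x ∈ cs := by
        cases hmem with
        | head => exact absurd rfl hcx
        | tail _ h => exact h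
      simp only [List.foldl]
      exact ih _ (step_pos w c b (hne c (by simp) hcx) hb) hmem' h0
        (fun d hd => hne d (by simp [hd]))

lemma scan_eq_fold (w : List Char) :
    pvScanA w = (['A','B','C','D'].foldl (pvStep w) none).map (fun b => b.2) := by
  induction w with
  | nil => decide
  | cons x xs ih =>
    by_cases hx : ['A','B','C','D'].contains x
    · have hmem : x ∈ ['A','B','C','D'] := by simpa using hx
      have h0 : PySem.Chars.find (x::xs) [x] = 0 := by
        rw [find_single_cons, if_pos rfl]
      have hne : ∀ c ∈ ['A','B','C','D'], c ≠ x → PySem.Chars.find (x::xs) [c] ≠ 0 := by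
        intro c _ hcx
        have hg := PySem.Chars.neg_one_le_find xs [c]
        rw [find_single_cons, if_neg (fun h => hcx h.symm)]
        split_ifs <;> omega
      rw [fold_zero (x::xs) x ['A','B','C','D'] none (fun p hp => by cases hp) hmem h0 hne]
      simp only [pvScanA, hx, if_pos, Option.map_some]
    · simp only [pvScanA, hx, Bool.false_eq_true, if_false, ih]
      have hs := foldl_shift x xs ['A','B','C','D'] none
          (by intro c hc hxc; apply hx; subst hxc; simpa using hc)
          (by intro p hp; cases hp)
      simp only [pvShift, Option.map_none] at hs
      rw [hs]
      cases ['A','B','C','D'].foldl (pvStep xs) none <;> rfl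

-- ===== VERDICT (by name: the statement is the Claim_ definition above) =====
theorem parse_mme_answer_spec : Claim_equal_parse_mme_answer := by
  intro text _
  unfold Spec_parse_mme_answer parse_mme_answer parse_mme_answer_alt
  set t := PySem.Str.upper (PySem.Str.strip text) with ht
  by_cases h0 : t = ""
  · simp [h0]
  · simp only [h0, if_false]
    rw [scan_eq_fold]
    cases hf : ['A','B','C','D'].foldl (pvStep (PySem.List.slice t.toList none (some 50))) none with
    | some b => simp
    | none =>
      simp only [Option.map_none]
      cases hl : t.toList with
      | nil =>
        exact absurd (String.toList_inj.mp hl) h0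
      | cons c rest =>
        have h1 : (PySem.Str.slice t none (some 1)).toList = [c] := by
          rw [PySem.Str.toList_slice, PySem.Chars.slice_eq_listSlice,
            PySem.List.slice_to _ (by omega), hl]
          rfl
        exact String.toList_inj.mp (by simp [h1])
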